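-- pv_equiv track=rewrite | github.com/suzannejin/nf_homoplasty | bin/organize_data/raw2delta.py | create_outheader
-- ===== SOURCE A (Python) =====
-- def create_outheader(aligners,mixtrees):
--
--     head=[["Family","nseq"]]
--     for aln in aligners:
--         for tr in mixtrees:
--             head[-1].append(aln)
--     head.append(["Family","nseq"])
--     for aln in aligners:
--         for tr in mixtrees:
--             head[-1].append(tr)
--
--     return(head)
-- ===== SOURCE B (Python) =====
-- def create_outheader(aligners, mixtrees):
--     # column-major: one (top, bottom) pair per output column, then transpose
--     cols = [("Family", "Family"), ("nseq", "nseq")]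
--     for aln in aligners:
--         for tr in mixtrees:
--             cols.append((aln, tr))
--     top, bottom = zip(*cols)
--     return [list(top), list(bottom)]
-- ===== Notes on version B (the rewrite author's own statement) =====
-- stated objective: alternative
-- what changed: B builds the table column-major as a list of (aligner, mixtree) pairs (one per output column, including the fixed header columns) and obtains the two rows by transposing with zip(*), instead of A filling each row in a separate pass of nested appends.
import Mathlib
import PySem

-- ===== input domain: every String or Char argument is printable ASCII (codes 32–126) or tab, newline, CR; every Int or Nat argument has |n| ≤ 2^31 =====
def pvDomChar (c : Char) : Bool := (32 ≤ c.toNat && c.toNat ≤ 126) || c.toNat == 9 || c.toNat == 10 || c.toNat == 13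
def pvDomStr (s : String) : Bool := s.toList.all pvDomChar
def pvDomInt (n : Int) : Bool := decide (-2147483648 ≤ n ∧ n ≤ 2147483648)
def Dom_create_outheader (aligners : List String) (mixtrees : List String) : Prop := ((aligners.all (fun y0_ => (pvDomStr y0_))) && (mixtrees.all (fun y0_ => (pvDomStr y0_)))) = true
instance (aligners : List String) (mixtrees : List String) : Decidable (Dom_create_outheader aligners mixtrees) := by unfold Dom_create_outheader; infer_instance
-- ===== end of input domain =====

-- B builds the header column-major as (top,bottom) pairs and transposes (unzip), instead of A's two row-filling passes; objective: alternative.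


-- ===== PORT A =====
-- head[-1].append(x) extends the row currently last in head: first loop nest
-- extends the first row, then the second row is appended and extended.
def create_outheader (aligners : List String) (mixtrees : List String) : List (List String) :=
  let row1 := aligners.foldl (fun r aln => mixtrees.foldl (fun r _tr => r ++ [aln]) r) ["Family", "nseq"]
  let row2 := aligners.foldl (fun r _aln => mixtrees.foldl (fun r tr => r ++ [tr]) r) ["Family", "nseq"]
  [row1, row2]

-- ===== PORT B =====
-- zip(*cols) on a nonempty list of pairs is exactly the unzip into firsts and seconds.
def create_outheader_alt (aligners : List String) (mixtrees : List String) : List (List String) :=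
  let cols := aligners.foldl
    (fun cs aln => mixtrees.foldl (fun cs tr => cs ++ [(aln, tr)]) cs)
    [("Family", "Family"), ("nseq", "nseq")]
  [cols.map Prod.fst, cols.map Prod.snd]

-- ===== PRECONDITION & SPEC =====
def Spec_create_outheader (aligners : List String) (mixtrees : List String) (out : List (List String)) : Prop := out = create_outheader_alt aligners mixtrees
instance (aligners : List String) (mixtrees : List String) (out : List (List String)) : Decidable (Spec_create_outheader aligners mixtrees out) := by unfold Spec_create_outheader; infer_instance

-- ===== CLAIM (what is proved, stated in full; the proofs are below) =====
def Claim_equal_create_outheader : Prop := ∀ (aligners : List String) (mixtrees : List String), Dom_create_outheader aligners mixtrees → Spec_create_outheader aligners mixtrees (create_outheader aligners mixtrees)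

-- ===== LEMMAS AND PROOFS =====

theorem pv_inner_fst (ts : List String) (aln : String) (cs : List (String × String)) :
    (ts.foldl (fun cs tr => cs ++ [(aln, tr)]) cs).map Prod.fst
      = ts.foldl (fun r _tr => r ++ [aln]) (cs.map Prod.fst) := by
  induction ts generalizing cs with
  | nil => rfl
  | cons t ts ih => rw [List.foldl_cons, List.foldl_cons, ih, List.map_append]; rfl

theorem pv_inner_snd (ts : List String) (aln : String) (cs : List (String × String)) :
    (ts.foldl (fun cs tr => cs ++ [(aln, tr)]) cs).map Prod.snd
      = ts.foldl (fun r tr => r ++ [tr]) (cs.map Prod.snd) := by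
  induction ts generalizing cs with
  | nil => rfl
  | cons t ts ih => rw [List.foldl_cons, List.foldl_cons, ih, List.map_append]; rfl

theorem pv_outer_fst (als ts : List String) (cs : List (String × String)) :
    (als.foldl (fun cs aln => ts.foldl (fun cs tr => cs ++ [(aln, tr)]) cs) cs).map Prod.fst
      = als.foldl (fun r aln => ts.foldl (fun r _tr => r ++ [aln]) r) (cs.map Prod.fst) := by
  induction als generalizing cs with
  | nil => rfl
  | cons a als ih => rw [List.foldl_cons, List.foldl_cons, ih, pv_inner_fst]

theorem pv_outer_snd (als ts : List String) (cs : List (String × String)) :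
    (als.foldl (fun cs aln => ts.foldl (fun cs tr => cs ++ [(aln, tr)]) cs) cs).map Prod.snd
      = als.foldl (fun r _aln => ts.foldl (fun r tr => r ++ [tr]) r) (cs.map Prod.snd) := by
  induction als generalizing cs with
  | nil => rfl
  | cons a als ih => rw [List.foldl_cons, List.foldl_cons, ih, pv_inner_snd]

-- ===== VERDICT (by name: the statement is the Claim_ definition above) =====
theorem create_outheader_spec : Claim_equal_create_outheader := by
  intro aligners mixtrees _
  show create_outheader aligners mixtrees = create_outheader_alt aligners mixtrees
  simp only [create_outheader, create_outheader_alt, pv_outer_fst, pv_outer_snd]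
  rfl
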